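-- pv_equiv track=rewrite | github.com/Jdvakil/vla_attention | scripts/run_full_pipeline.py | build_task_list
-- ===== SOURCE A (Python) =====
-- def build_task_list(tasks_per_category: int) -> list[tuple[str, str]]:
--     lang = [(f"libero_spatial_{i}", "language_dominant")
--             for i in range(tasks_per_category)]
--     lang += [(f"libero_goal_{i}", "language_dominant")
--              for i in range(tasks_per_category)]
--     vis = [(f"libero_object_{i}", "vision_dominant")
--            for i in range(tasks_per_category)]
--     vis += [(f"libero_long_{i}", "vision_dominant")
--             for i in range(tasks_per_category)]
--     return lang + vis
-- ===== SOURCE B (Python) =====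
-- def build_task_list(tasks_per_category: int) -> list[tuple[str, str]]:
--     prefixes = ["libero_spatial", "libero_goal", "libero_object", "libero_long"]
--     return [
--         (f"{prefixes[k // tasks_per_category]}_{k % tasks_per_category}",
--          "language_dominant" if k // tasks_per_category < 2 else "vision_dominant")
--         for k in range(4 * tasks_per_category)
--     ]
-- ===== Notes on version B (the rewrite author's own statement) =====
-- stated objective: alternative
-- what changed: Replaces the four staged comprehensions and concatenations with one flat comprehension over range(4*n) that recovers the block (prefix and category) by integer division k // n and the task index by k % n.
import Mathlib
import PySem

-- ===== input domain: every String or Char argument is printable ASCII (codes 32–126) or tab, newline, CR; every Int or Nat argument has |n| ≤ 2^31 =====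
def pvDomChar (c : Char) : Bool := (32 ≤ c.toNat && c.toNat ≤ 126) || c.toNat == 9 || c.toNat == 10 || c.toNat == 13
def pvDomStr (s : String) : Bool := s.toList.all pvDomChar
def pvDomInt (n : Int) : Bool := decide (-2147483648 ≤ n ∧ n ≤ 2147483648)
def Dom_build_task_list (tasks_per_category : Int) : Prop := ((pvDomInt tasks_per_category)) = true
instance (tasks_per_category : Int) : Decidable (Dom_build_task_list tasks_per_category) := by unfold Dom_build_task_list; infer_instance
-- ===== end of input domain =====

-- B replaces A's four staged comprehensions and concatenations with one flat pass over
-- range(4*n) recovering the block by k // n and the task index by k % n (objective: alternative).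

-- ===== PORT A =====
def build_task_list (tasks_per_category : Int) : List (String × String) :=
  let lang := (PySem.List.pyRange 0 tasks_per_category 1).map
      (fun i => ("libero_spatial_" ++ PySem.Int.toStr i, "language_dominant"))
  let lang := lang ++ (PySem.List.pyRange 0 tasks_per_category 1).map
      (fun i => ("libero_goal_" ++ PySem.Int.toStr i, "language_dominant"))
  let vis := (PySem.List.pyRange 0 tasks_per_category 1).map
      (fun i => ("libero_object_" ++ PySem.Int.toStr i, "vision_dominant"))
  let vis := vis ++ (PySem.List.pyRange 0 tasks_per_category 1).map
      (fun i => ("libero_long_" ++ PySem.Int.toStr i, "vision_dominant"))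
  lang ++ vis

-- ===== PORT B =====
-- prefixes[k // n] is ported via pyGetD; the index is always in range (0 ≤ k < 4n), so this
-- is exact where the Python returns.
def build_task_list_alt (tasks_per_category : Int) : List (String × String) :=
  let prefixes : List String :=
    ["libero_spatial", "libero_goal", "libero_object", "libero_long"]
  (PySem.List.pyRange 0 (4 * tasks_per_category) 1).map (fun k =>
    (PySem.List.pyGetD prefixes (PySem.Int.floordiv k tasks_per_category) "" ++ "_" ++
       PySem.Int.toStr (PySem.Int.mod k tasks_per_category),
     if PySem.Int.floordiv k tasks_per_category < 2 then "language_dominant"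
     else "vision_dominant"))

-- ===== PRECONDITION & SPEC =====
def Spec_build_task_list (tasks_per_category : Int) (out : List (String × String)) : Prop := out = build_task_list_alt tasks_per_category
instance (tasks_per_category : Int) (out : List (String × String)) : Decidable (Spec_build_task_list tasks_per_category out) := by unfold Spec_build_task_list; infer_instance

-- ===== CLAIM (what is proved, stated in full; the proofs are below) =====
def Claim_equal_build_task_list : Prop := ∀ (tasks_per_category : Int), Dom_build_task_list tasks_per_category → Spec_build_task_list tasks_per_category (build_task_list tasks_per_category)

-- ===== LEMMAS AND PROOFS =====

-- One block of B's flat range equals A's corresponding comprehension: for k in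
-- [j*n, (j+1)*n) we have k // n = j and k % n = k - j*n.
theorem pv_block (n j a b : Int) (ha : a = j * n) (hb : b = (j + 1) * n) (hn : 0 < n)
    (f : Int → String × String) (g : Int → String × String)
    (hfg : ∀ i, 0 ≤ i → i < n → f (j * n + i) = g i) :
    (PySem.List.pyRange a b 1).map f = (PySem.List.pyRange 0 n 1).map g := by
  subst ha hb
  rw [PySem.List.pyRange_one, PySem.List.pyRange_one]
  have h1 : ((j + 1) * n - j * n).toNat = n.toNat := by
    have : (j + 1) * n - j * n = n := by ring
    rw [this]
  have h2 : (n - 0).toNat = n.toNat := by norm_num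
  rw [h1, h2, List.map_map, List.map_map]
  refine List.map_congr_left ?_
  intro k hk
  have hk' : (k : Int) < n := by
    have := List.mem_range.mp hk
    omega
  simp only [Function.comp]
  have := hfg k (by positivity) hk'
  simpa using this

theorem pv_fdm (n j i : Int) (hn : 0 < n) (h0 : 0 ≤ i) (hi : i < n) :
    PySem.Int.floordiv (j * n + i) n = j ∧ PySem.Int.mod (j * n + i) n = i := by
  have hq : PySem.Int.floordiv (j * n + i) n = j := by
    rw [PySem.Int.floordiv_eq_iff_of_pos hn]
    constructor <;> nlinarith
  refine ⟨hq, ?_⟩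
  have := PySem.Int.floordiv_mul_add_mod (j * n + i) n
  rw [hq] at this
  omega

-- ===== VERDICT (by name: the statement is the Claim_ definition above) =====
theorem build_task_list_spec : Claim_equal_build_task_list := by
  intro n _
  unfold Spec_build_task_list build_task_list build_task_list_alt
  by_cases hn : n ≤ 0
  · rw [PySem.List.pyRange_one_eq_nil hn, PySem.List.pyRange_one_eq_nil (by omega : 4 * n ≤ 0)]
    simp
  · replace hn : 0 < n := by omega
    have hsplit : PySem.List.pyRange 0 (4 * n) 1 =
        PySem.List.pyRange 0 n 1 ++ PySem.List.pyRange n (2 * n) 1 ++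
        PySem.List.pyRange (2 * n) (3 * n) 1 ++ PySem.List.pyRange (3 * n) (4 * n) 1 := by
      rw [PySem.List.pyRange_one_append 0 (2 * n) (4 * n) (by omega) (by omega),
          PySem.List.pyRange_one_append 0 n (2 * n) (by omega) (by omega),
          PySem.List.pyRange_one_append (2 * n) (3 * n) (4 * n) (by omega) (by omega)]
      simp [List.append_assoc]
    have hblock := fun (j : Int) (a b : Int) (ha : a = j * n) (hb : b = (j + 1) * n)
        (g : Int → String × String)
        (hfg : ∀ i, 0 ≤ i → i < n →
          (PySem.List.pyGetD ["libero_spatial", "libero_goal", "libero_object", "libero_long"]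
              (PySem.Int.floordiv (j * n + i) n) "" ++ "_" ++
              PySem.Int.toStr (PySem.Int.mod (j * n + i) n),
            if PySem.Int.floordiv (j * n + i) n < 2 then "language_dominant"
            else "vision_dominant") = g i) =>
      pv_block n j a b ha hb hn
        (fun k =>
          (PySem.List.pyGetD ["libero_spatial", "libero_goal", "libero_object", "libero_long"]
              (PySem.Int.floordiv k n) "" ++ "_" ++
              PySem.Int.toStr (PySem.Int.mod k n),
            if PySem.Int.floordiv k n < 2 then "language_dominant" else "vision_dominant"))
        g hfg
    rw [hsplit, List.map_append, List.map_append, List.map_append,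
        hblock 0 0 n (by ring) (by ring)
          (fun i => ("libero_spatial_" ++ PySem.Int.toStr i, "language_dominant"))
          (fun i h0 hi => by
            obtain ⟨hq, hm⟩ := pv_fdm n 0 i hn h0 hi
            rw [hq, hm]; simp [PySem.List.pyGetD]),
        hblock 1 n (2 * n) (by ring) (by ring)
          (fun i => ("libero_goal_" ++ PySem.Int.toStr i, "language_dominant"))
          (fun i h0 hi => by
            obtain ⟨hq, hm⟩ := pv_fdm n 1 i hn h0 hi
            rw [hq, hm]; simp [PySem.List.pyGetD]),
        hblock 2 (2 * n) (3 * n) (by ring) (by ring)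
          (fun i => ("libero_object_" ++ PySem.Int.toStr i, "vision_dominant"))
          (fun i h0 hi => by
            obtain ⟨hq, hm⟩ := pv_fdm n 2 i hn h0 hi
            rw [hq, hm]; simp [PySem.List.pyGetD]),
        hblock 3 (3 * n) (4 * n) (by ring) (by ring)
          (fun i => ("libero_long_" ++ PySem.Int.toStr i, "vision_dominant"))
          (fun i h0 hi => by
            obtain ⟨hq, hm⟩ := pv_fdm n 3 i hn h0 hi
            rw [hq, hm]; simp [PySem.List.pyGetD])]
    simp [List.append_assoc]
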